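-- pv_equiv track=rewrite | github.com/mgtezak/Advent-of-Code-Puzzle-Solver | my_functions/solutions/aoc2018.py | aoc2018_day5_part1
-- ===== SOURCE A (Python) =====
-- def aoc2018_day5_part1(puzzle_input):
--     remaining = []
--     for char in puzzle_input:
--         if remaining and abs(ord(char) - ord(remaining[-1])) == 32:
--             remaining.pop()
--         else :
--             remaining.append(char)
--     return len(remaining)
-- ===== SOURCE B (Python) =====
-- def aoc2018_day5_part1(puzzle_input):
--     units = list(puzzle_input)
--     i = 0
--     while i + 1 < len(units):
--         if abs(ord(units[i]) - ord(units[i + 1])) == 32: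
--             del units[i:i + 2]
--             i = i - 1 if i else 0
--         else:
--             i += 1
--     return len(units)
-- ===== Notes on version B (the rewrite author's own statement) =====
-- stated objective: alternative
-- what changed: B reduces the polymer in place with a cursor that deletes the reacting pair under it and steps back one position, instead of A's separate push/pop stack built from the input.
import Mathlib
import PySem

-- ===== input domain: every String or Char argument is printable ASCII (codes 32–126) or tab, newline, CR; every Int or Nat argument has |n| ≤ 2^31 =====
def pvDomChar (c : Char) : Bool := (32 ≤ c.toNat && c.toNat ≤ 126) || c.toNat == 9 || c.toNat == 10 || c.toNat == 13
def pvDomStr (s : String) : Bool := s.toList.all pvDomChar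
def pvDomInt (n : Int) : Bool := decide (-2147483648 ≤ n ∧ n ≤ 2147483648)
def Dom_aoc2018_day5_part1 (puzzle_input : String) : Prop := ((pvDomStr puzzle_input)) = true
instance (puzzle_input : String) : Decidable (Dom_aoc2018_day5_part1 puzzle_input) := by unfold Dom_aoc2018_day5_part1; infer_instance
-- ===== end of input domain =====

-- B re-implements the polymer reduction in place: a cursor walks the polymer itself, deleting the
-- reacting pair under it and stepping back one, instead of A's separate push/pop stack. Same cost class.

-- ===== PORT A =====
-- the reaction test: abs(ord(c) - ord(d)) == 32
def pvReact (c d : Char) : Bool := ((c.toNat : Int) - (d.toNat : Int)).natAbs == 32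

-- body of A's loop: 'if remaining and abs(ord(char)-ord(remaining[-1]))==32: pop else: append'
-- (remaining is kept head-first: head = Python's remaining[-1])
def pvStepA (remaining : List Char) (char : Char) : List Char :=
  match remaining with
  | last :: rest => if pvReact char last then rest else char :: last :: rest
  | [] => [char]

def aoc2018_day5_part1 (puzzle_input : String) : Int :=
  ((puzzle_input.toList).foldl pvStepA []).length

-- ===== PORT B =====
-- B's while loop: state = (units, i); 'del units[i:i+2]; i = i-1 if i else 0' / 'i += 1'
def pvGoB (units : List Char) (i : Nat) : Int :=
  if h : i + 1 < units.length then
    if pvReact (units[i]'(by omega)) (units[i + 1]'h) then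
      pvGoB (units.take i ++ units.drop (i + 2)) (i - 1)
    else
      pvGoB units (i + 1)
  else
    (units.length : Int)
termination_by 2 * units.length - i
decreasing_by
  · simp only [List.length_append, List.length_take, List.length_drop]; omega
  · omega

def aoc2018_day5_part1_alt (puzzle_input : String) : Int :=
  pvGoB puzzle_input.toList 0

-- ===== PRECONDITION & SPEC =====
def Spec_aoc2018_day5_part1 (puzzle_input : String) (out : Int) : Prop := out = aoc2018_day5_part1_alt puzzle_input
instance (puzzle_input : String) (out : Int) : Decidable (Spec_aoc2018_day5_part1 puzzle_input out) := by unfold Spec_aoc2018_day5_part1; infer_instance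

-- ===== CLAIM (what is proved, stated in full; the proofs are below) =====
def Claim_equal_aoc2018_day5_part1 : Prop := ∀ (puzzle_input : String), Dom_aoc2018_day5_part1 puzzle_input → Spec_aoc2018_day5_part1 puzzle_input (aoc2018_day5_part1 puzzle_input)

-- ===== LEMMAS AND PROOFS =====

-- the reaction test is symmetric
theorem pvReact_comm (c d : Char) : pvReact c d = pvReact d c := by
  unfold pvReact
  congr 1
  omega

-- over a prefix with no adjacent reacting pair, A's stack just reverses the prefix
theorem foldl_stepA_noPair (s : List Char) :
    ∀ st : List Char, List.IsChain (fun a b => pvReact a b = false) s →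
    (∀ c d, s.head? = some c → st.head? = some d → pvReact c d = false) →
    List.foldl pvStepA st s = s.reverse ++ st := by
  induction s with
  | nil => intro st _ _; simp
  | cons c s ih =>
    intro st hch hbd
    have hstep : pvStepA st c = c :: st := by
      match st with
      | [] => rfl
      | d :: st' =>
        have : pvReact c d = false := hbd c d rfl rfl
        simp [pvStepA, this]
    have hch' : List.IsChain (fun a b => pvReact a b = false) s := hch.tail
    have hbd' : ∀ c' d, s.head? = some c' → (c :: st).head? = some d → pvReact c' d = false := by
      intro c' d hc' hd
      simp only [List.head?_cons, Option.some.injEq] at hd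
      subst hd
      have := List.isChain_cons.mp hch
      have h1 := this.1 c' hc'
      rw [pvReact_comm]; exact h1
    simp only [List.foldl_cons, hstep, ih (c :: st) hch' hbd']
    simp

-- deleting the leftmost adjacent reacting pair does not change A's stack result
theorem foldl_stepA_delete (x y : List Char) (a b : Char)
    (hab : pvReact a b = true)
    (hx : List.IsChain (fun u v => pvReact u v = false) (x ++ [a])) :
    List.foldl pvStepA [] (x ++ a :: b :: y) = List.foldl pvStepA [] (x ++ y) := by
  have hxa : List.foldl pvStepA [] (x ++ [a]) = a :: x.reverse := by
    have := foldl_stepA_noPair (x ++ [a]) [] hx (by intro c d _ hd; simp at hd)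
    simpa using this
  have hxonly : List.IsChain (fun u v => pvReact u v = false) x :=
    ((List.isChain_append).mp hx).1
  have hxr : List.foldl pvStepA [] x = x.reverse := by
    have := foldl_stepA_noPair x [] hxonly (by intro c d _ hd; simp at hd)
    simpa using this
  have hba : pvReact b a = true := by rw [pvReact_comm]; exact hab
  calc List.foldl pvStepA [] (x ++ a :: b :: y)
      = List.foldl pvStepA (List.foldl pvStepA [] (x ++ [a])) (b :: y) := by
        rw [← List.foldl_append]; simp
    _ = List.foldl pvStepA (a :: x.reverse) (b :: y) := by rw [hxa]
    _ = List.foldl pvStepA x.reverse y := by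
        simp only [List.foldl_cons, pvStepA, hba, if_pos]
    _ = List.foldl pvStepA (List.foldl pvStepA [] x) y := by rw [hxr]
    _ = List.foldl pvStepA [] (x ++ y) := by rw [List.foldl_append]

-- main invariant: while no pair strictly left of the cursor reacts, B's loop computes A's answer
theorem pvGoB_eq (n : Nat) : ∀ (l : List Char) (i : Nat), 2 * l.length - i ≤ n →
    (∀ j, (hj : j + 1 < l.length) → j < i → pvReact (l[j]'(by omega)) (l[j + 1]'hj) = false) →
    pvGoB l i = ((List.foldl pvStepA [] l).length : Int) := by
  induction n with
  | zero =>
    intro l i hn hinv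
    have hlen : l.length = 0 ∨ l.length ≤ i := by omega
    rw [pvGoB]
    have hterm : ¬ (i + 1 < l.length) := by omega
    rw [dif_neg hterm]
    have hch : List.IsChain (fun a b => pvReact a b = false) l := by
      rw [List.isChain_iff_getElem]
      intro j hj
      exact hinv j (by omega) (by omega)
    have := foldl_stepA_noPair l [] hch (by intro c d _ hd; simp at hd)
    simp [this]
  | succ n ih =>
    intro l i hn hinv
    rw [pvGoB]
    by_cases h : i + 1 < l.length
    · rw [dif_pos h]
      by_cases hr : pvReact (l[i]'(by omega)) (l[i + 1]'h) = true
      · rw [if_pos hr]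
        -- the deletion case: use foldl_stepA_delete with x = l.take i
        have hdecomp : l = l.take i ++ l[i]'(by omega) :: l[i+1]'h :: l.drop (i + 2) := by
          conv_lhs => rw [← List.take_append_drop i l]
          congr 1
          rw [List.drop_eq_getElem_cons (by omega : i < l.length)]
          congr 1
          rw [List.drop_eq_getElem_cons (by omega : i + 1 < l.length)]
        have hchx : List.IsChain (fun u v => pvReact u v = false) (l.take i ++ [l[i]'(by omega)]) := by
          have htk : l.take i ++ [l[i]'(by omega)] = l.take (i + 1) := by
            rw [List.take_add_one]
            congr 1
            simp [List.getElem?_eq_getElem (by omega : i < l.length)]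
          rw [htk, List.isChain_iff_getElem]
          intro j hj
          simp only [List.length_take] at hj
          have hj1 : j + 1 < l.length := by omega
          have e1 : (l.take (i+1))[j]'(by simp; omega) = l[j]'(by omega) := by
            simp [List.getElem_take]
          have e2 : (l.take (i+1))[j+1]'(by simp; omega) = l[j+1]'hj1 := by
            simp [List.getElem_take]
          rw [e1, e2]
          exact hinv j hj1 (by omega)
        have hdel := foldl_stepA_delete (l.take i) (l.drop (i + 2)) (l[i]'(by omega)) (l[i+1]'h) hr hchx
        have hinv' : ∀ j, (hj : j + 1 < (l.take i ++ l.drop (i + 2)).length) → j < i - 1 →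
            pvReact ((l.take i ++ l.drop (i + 2))[j]'(by omega)) ((l.take i ++ l.drop (i + 2))[j + 1]'hj) = false := by
          intro j hj hji
          have hil : i ≤ l.length := by omega
          have hlt : l.length - 2 = (l.take i ++ l.drop (i + 2)).length := by
            simp; omega
          have hj' : j + 1 < i := by omega
          have e1 : (l.take i ++ l.drop (i + 2))[j]'(by omega) = l[j]'(by omega) := by
            rw [List.getElem_append_left (by simp; omega)]
            simp [List.getElem_take]
          have e2 : (l.take i ++ l.drop (i + 2))[j + 1]'hj = l[j + 1]'(by omega) := by
            rw [List.getElem_append_left (by simp; omega)]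
            simp [List.getElem_take]
          rw [e1, e2]
          exact hinv j (by omega) (by omega)
        have hlen' : (l.take i ++ l.drop (i + 2)).length = l.length - 2 := by
          simp; omega
        rw [ih (l.take i ++ l.drop (i + 2)) (i - 1) (by rw [hlen']; omega) hinv']
        rw [← hdel, ← hdecomp]
      · rw [if_neg hr]
        apply ih l (i + 1) (by omega)
        intro j hj hji
        by_cases hji' : j < i
        · exact hinv j hj hji'
        · have : j = i := by omega
          subst this
          simpa using hr
    · rw [dif_neg h]
      have hch : List.IsChain (fun a b => pvReact a b = false) l := by
        rw [List.isChain_iff_getElem]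
        intro j hj
        exact hinv j (by omega) (by omega)
      have := foldl_stepA_noPair l [] hch (by intro c d _ hd; simp at hd)
      simp [this]

-- ===== VERDICT (by name: the statement is the Claim_ definition above) =====
theorem aoc2018_day5_part1_spec : Claim_equal_aoc2018_day5_part1 := by
  intro s _
  unfold Spec_aoc2018_day5_part1 aoc2018_day5_part1 aoc2018_day5_part1_alt
  rw [pvGoB_eq (2 * s.toList.length) s.toList 0 (by omega) (by intro j _ hj; omega)]
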